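-- pv_equiv track=rewrite | github.com/Frogsdiary/dream-mecha | dream_mecha/core/utils/piece_generator.py | _calculate_perimeter
-- ===== SOURCE A (Python) =====
-- from typing import Dict, List, Optional, Any, Tuple
--
-- def _calculate_perimeter(shape: List[List[bool]]) -> int:
--     """Calculate perimeter of shape"""
--     if not shape:
--         return 0
--
--     rows, cols = len(shape), len(shape[0])
--     perimeter = 0
--
--     for y in range(rows):
--         for x in range(cols):
--             if shape[y][x]:
--                 # Check each direction
--                 for dx, dy in [(-1, 0), (1, 0), (0, -1), (0, 1)]:
--                     nx, ny = x + dx, y + dy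
--                     if (nx < 0 or nx >= cols or ny < 0 or ny >= rows or
--                         not shape[ny][nx]):
--                         perimeter += 1
--
--     return perimeter
-- ===== SOURCE B (Python) =====
-- from typing import List
--
-- def _calculate_perimeter(shape: List[List[bool]]) -> int:
--     """Calculate perimeter of shape as 4*filled - 2*shared_edges."""
--     if not shape:
--         return 0
--
--     rows, cols = len(shape), len(shape[0])
--     filled = 0
--     shared = 0
--
--     for y in range(rows):
--         for x in range(cols):
--             if shape[y][x]:
--                 filled += 1
--                 if x + 1 < cols and shape[y][x + 1]:
--                     shared += 1
--                 if y + 1 < rows and shape[y + 1][x]: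
--                     shared += 1
--
--     return 4 * filled - 2 * shared
-- ===== Notes on version B (the rewrite author's own statement) =====
-- stated objective: faster
-- what changed: Replaces the per-cell scan over the four neighbour directions with the edge-counting identity perimeter = 4*filled - 2*shared: one pass counts filled cells and only right/down adjacencies.
import Mathlib
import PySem

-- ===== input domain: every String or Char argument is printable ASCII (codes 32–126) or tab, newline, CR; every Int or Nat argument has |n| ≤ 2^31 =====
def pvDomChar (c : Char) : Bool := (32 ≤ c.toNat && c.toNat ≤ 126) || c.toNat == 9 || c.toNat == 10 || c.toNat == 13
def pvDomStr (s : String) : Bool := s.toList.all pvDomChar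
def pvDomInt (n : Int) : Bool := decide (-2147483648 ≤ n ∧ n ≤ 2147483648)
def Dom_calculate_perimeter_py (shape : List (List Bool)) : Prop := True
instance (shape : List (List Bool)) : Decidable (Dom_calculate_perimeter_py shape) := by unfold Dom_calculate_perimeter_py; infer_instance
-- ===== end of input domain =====

-- B computes the same perimeter by the identity 4*filled - 2*shared_edges in one pass over the
-- same index ranges (alternative decomposition; return-value equivalence proved below).

-- shared indexing helper: shape[y][x] (every access both ports make inside Pre_ is in range)
def pvCell (shape : List (List Bool)) (y x : Nat) : Bool := (shape.getD y []).getD x false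

-- ===== PORT A =====
def calculate_perimeter_py (shape : List (List Bool)) : Int :=
  if shape = [] then 0
  else
    (List.range shape.length).foldl (fun per y =>
      (List.range (shape.headD []).length).foldl (fun per x =>
        if pvCell shape y x then
          ([((-1 : Int), (0 : Int)), (1, 0), (0, -1), (0, 1)]).foldl (fun per d =>
            if (x : Int) + d.1 < 0 ∨ (x : Int) + d.1 ≥ ((shape.headD []).length : Int) ∨
               (y : Int) + d.2 < 0 ∨ (y : Int) + d.2 ≥ (shape.length : Int) ∨
               ¬ pvCell shape ((y : Int) + d.2).toNat ((x : Int) + d.1).toNat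
            then per + 1 else per) per
        else per) per) 0

-- ===== PORT B =====
def calculate_perimeter_py_alt (shape : List (List Bool)) : Int :=
  if shape = [] then 0
  else
    let st := (List.range shape.length).foldl (fun (st : Int × Int) y =>
      (List.range (shape.headD []).length).foldl (fun (st : Int × Int) x =>
        if pvCell shape y x then
          (st.1 + 1,
           st.2 + (if x + 1 < (shape.headD []).length ∧ pvCell shape y (x + 1) then 1 else 0)
                + (if y + 1 < shape.length ∧ pvCell shape (y + 1) x then 1 else 0))
        else st) st) ((0 : Int), (0 : Int))
    4 * st.1 - 2 * st.2

-- ===== PRECONDITION & SPEC =====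
-- Pre_ excludes exactly the jagged grids on which the Python A raises IndexError
-- (some row shorter than the first row); A returns normally on every other input.
def Pre_calculate_perimeter_py (shape : List (List Bool)) : Prop :=
  ∀ row ∈ shape, (shape.headD []).length ≤ row.length
instance (shape : List (List Bool)) : Decidable (Pre_calculate_perimeter_py shape) := by
  unfold Pre_calculate_perimeter_py; infer_instance

def pvWitness_calculate_perimeter_py : List (List Bool) := [[true, false], [false, true]]

def Spec_calculate_perimeter_py (shape : List (List Bool)) (out : Int) : Prop := out = calculate_perimeter_py_alt shape
instance (shape : List (List Bool)) (out : Int) : Decidable (Spec_calculate_perimeter_py shape out) := by unfold Spec_calculate_perimeter_py; infer_instance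

-- ===== CLAIM (what is proved, stated in full; the proofs are below) =====
def Claim_equal_calculate_perimeter_py : Prop := ∀ (shape : List (List Bool)), Dom_calculate_perimeter_py shape → Pre_calculate_perimeter_py shape → Spec_calculate_perimeter_py shape (calculate_perimeter_py shape)

-- ===== LEMMAS AND PROOFS =====

-- per-cell contribution of port A (conditions written exactly as the unfolded direction fold produces)
def ACell (shape : List (List Bool)) (rows cols y x : Nat) : Int :=
  if pvCell shape y x then
    ((if (x : Int) + -1 < 0 ∨ (x : Int) + -1 ≥ (cols : Int) ∨ (y : Int) + 0 < 0 ∨ (y : Int) + 0 ≥ (rows : Int) ∨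
        ¬ pvCell shape ((y : Int) + 0).toNat ((x : Int) + -1).toNat then (1 : Int) else 0)
     + (if (x : Int) + 1 < 0 ∨ (x : Int) + 1 ≥ (cols : Int) ∨ (y : Int) + 0 < 0 ∨ (y : Int) + 0 ≥ (rows : Int) ∨
        ¬ pvCell shape ((y : Int) + 0).toNat ((x : Int) + 1).toNat then (1 : Int) else 0)
     + (if (x : Int) + 0 < 0 ∨ (x : Int) + 0 ≥ (cols : Int) ∨ (y : Int) + -1 < 0 ∨ (y : Int) + -1 ≥ (rows : Int) ∨
        ¬ pvCell shape ((y : Int) + -1).toNat ((x : Int) + 0).toNat then (1 : Int) else 0)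
     + (if (x : Int) + 0 < 0 ∨ (x : Int) + 0 ≥ (cols : Int) ∨ (y : Int) + 1 < 0 ∨ (y : Int) + 1 ≥ (rows : Int) ∨
        ¬ pvCell shape ((y : Int) + 1).toNat ((x : Int) + 0).toNat then (1 : Int) else 0))
  else 0

def Fill (shape : List (List Bool)) (y x : Nat) : Int := if pvCell shape y x then 1 else 0

def SharedCell (shape : List (List Bool)) (rows cols y x : Nat) : Int :=
  if pvCell shape y x then
    (if x + 1 < cols ∧ pvCell shape y (x + 1) then (1 : Int) else 0)
    + (if y + 1 < rows ∧ pvCell shape (y + 1) x then (1 : Int) else 0)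
  else 0

lemma foldl_range_add (f : Nat → Int) :
    ∀ (n : Nat) (c : Int), (List.range n).foldl (fun s i => s + f i) c = c + ∑ i ∈ Finset.range n, f i := by
  intro n
  induction n with
  | zero => intro c; simp
  | succ m ih => intro c; simp [List.range_succ, Finset.sum_range_succ, ih, add_assoc]

lemma foldl_range_pair (f g : Nat → Int) :
    ∀ (n : Nat) (c : Int × Int),
      (List.range n).foldl (fun (s : Int × Int) i => (s.1 + f i, s.2 + g i)) c
        = (c.1 + ∑ i ∈ Finset.range n, f i, c.2 + ∑ i ∈ Finset.range n, g i) := by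
  intro n
  induction n with
  | zero => intro c; simp
  | succ m ih => intro c; simp [List.range_succ, Finset.sum_range_succ, ih, add_assoc]

lemma A_eq_sum (shape : List (List Bool)) :
    calculate_perimeter_py shape
      = ∑ y ∈ Finset.range shape.length, ∑ x ∈ Finset.range (shape.headD []).length,
          ACell shape shape.length (shape.headD []).length y x := by
  by_cases h : shape = []
  · simp [calculate_perimeter_py, h]
  · unfold calculate_perimeter_py
    rw [if_neg h]
    have houter : (fun (per : Int) y =>
        (List.range (shape.headD []).length).foldl (fun per x =>
          if pvCell shape y x then
            ([((-1 : Int), (0 : Int)), (1, 0), (0, -1), (0, 1)]).foldl (fun per d =>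
              if (x : Int) + d.1 < 0 ∨ (x : Int) + d.1 ≥ ((shape.headD []).length : Int) ∨
                 (y : Int) + d.2 < 0 ∨ (y : Int) + d.2 ≥ (shape.length : Int) ∨
                 ¬ pvCell shape ((y : Int) + d.2).toNat ((x : Int) + d.1).toNat
              then per + 1 else per) per
          else per) per)
        = (fun (per : Int) y => per + ∑ x ∈ Finset.range (shape.headD []).length,
            ACell shape shape.length (shape.headD []).length y x) := by
      funext per y
      have hstep : (fun (per : Int) x =>
          if pvCell shape y x then
            ([((-1 : Int), (0 : Int)), (1, 0), (0, -1), (0, 1)]).foldl (fun per d =>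
              if (x : Int) + d.1 < 0 ∨ (x : Int) + d.1 ≥ ((shape.headD []).length : Int) ∨
                 (y : Int) + d.2 < 0 ∨ (y : Int) + d.2 ≥ (shape.length : Int) ∨
                 ¬ pvCell shape ((y : Int) + d.2).toNat ((x : Int) + d.1).toNat
              then per + 1 else per) per
          else per)
          = (fun (per : Int) x => per + ACell shape shape.length (shape.headD []).length y x) := by
        funext per x
        by_cases hb : pvCell shape y x
        · rw [if_pos hb]
          rw [ACell, if_pos hb]
          simp only [List.foldl_cons, List.foldl_nil]
          split_ifs <;> ring
        · rw [if_neg hb, ACell, if_neg hb, add_zero]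
      rw [hstep, foldl_range_add]
    rw [houter, foldl_range_add, zero_add]

lemma B_eq_sum (shape : List (List Bool)) :
    calculate_perimeter_py_alt shape
      = 4 * (∑ y ∈ Finset.range shape.length, ∑ x ∈ Finset.range (shape.headD []).length,
              Fill shape y x)
        - 2 * (∑ y ∈ Finset.range shape.length, ∑ x ∈ Finset.range (shape.headD []).length,
              SharedCell shape shape.length (shape.headD []).length y x) := by
  by_cases h : shape = []
  · simp [calculate_perimeter_py_alt, h]
  · unfold calculate_perimeter_py_alt
    rw [if_neg h]
    have houter : (fun (st : Int × Int) y =>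
        (List.range (shape.headD []).length).foldl (fun (st : Int × Int) x =>
          if pvCell shape y x then
            (st.1 + 1,
             st.2 + (if x + 1 < (shape.headD []).length ∧ pvCell shape y (x + 1) then 1 else 0)
                  + (if y + 1 < shape.length ∧ pvCell shape (y + 1) x then 1 else 0))
          else st) st)
        = (fun (st : Int × Int) y =>
            (st.1 + ∑ x ∈ Finset.range (shape.headD []).length, Fill shape y x,
             st.2 + ∑ x ∈ Finset.range (shape.headD []).length,
               SharedCell shape shape.length (shape.headD []).length y x)) := by
      funext st y
      have hstep : (fun (st : Int × Int) x =>
          if pvCell shape y x then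
            (st.1 + 1,
             st.2 + (if x + 1 < (shape.headD []).length ∧ pvCell shape y (x + 1) then 1 else 0)
                  + (if y + 1 < shape.length ∧ pvCell shape (y + 1) x then 1 else 0))
          else st)
          = (fun (st : Int × Int) x =>
              (st.1 + Fill shape y x,
               st.2 + SharedCell shape shape.length (shape.headD []).length y x)) := by
        funext st x
        by_cases hb : pvCell shape y x
        · rw [if_pos hb]
          rw [Fill, if_pos hb, SharedCell, if_pos hb, Prod.mk.injEq]
          exact ⟨rfl, by ring⟩
        · rw [if_neg hb, Fill, if_neg hb, SharedCell, if_neg hb, add_zero, add_zero]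
      rw [hstep, foldl_range_pair]
    rw [houter, foldl_range_pair, zero_add, zero_add]

lemma ACell_eq (shape : List (List Bool)) (rows cols y x : Nat) (hy : y < rows) (hx : x < cols) :
    ACell shape rows cols y x
      = 4 * Fill shape y x
        - (if pvCell shape y x ∧ 1 ≤ x ∧ pvCell shape y (x - 1) then (1 : Int) else 0)
        - (if pvCell shape y x ∧ x + 1 < cols ∧ pvCell shape y (x + 1) then (1 : Int) else 0)
        - (if pvCell shape y x ∧ 1 ≤ y ∧ pvCell shape (y - 1) x then (1 : Int) else 0)
        - (if pvCell shape y x ∧ y + 1 < rows ∧ pvCell shape (y + 1) x then (1 : Int) else 0) := by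
  have e1 : (((x : Int) + -1)).toNat = x - 1 := by omega
  have e2 : (((x : Int) + 1)).toNat = x + 1 := by omega
  have e3 : (((y : Int) + -1)).toNat = y - 1 := by omega
  have e4 : (((y : Int) + 1)).toNat = y + 1 := by omega
  have e5 : (((y : Int) + 0)).toNat = y := by omega
  have e6 : (((x : Int) + 0)).toNat = x := by omega
  unfold ACell Fill
  simp only [e1, e2, e3, e4, e5, e6]
  by_cases hb : pvCell shape y x
  · simp only [hb, if_true, true_and]
    have f1 : (if (x : Int) + -1 < 0 ∨ (x : Int) + -1 ≥ (cols : Int) ∨ (y : Int) + 0 < 0 ∨ (y : Int) + 0 ≥ (rows : Int) ∨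
        ¬ pvCell shape y (x - 1) then (1 : Int) else 0)
        = 1 - (if 1 ≤ x ∧ pvCell shape y (x - 1) then (1 : Int) else 0) := by
      split_ifs with h1 h2 <;> simp_all <;> omega
    have f2 : (if (x : Int) + 1 < 0 ∨ (x : Int) + 1 ≥ (cols : Int) ∨ (y : Int) + 0 < 0 ∨ (y : Int) + 0 ≥ (rows : Int) ∨
        ¬ pvCell shape y (x + 1) then (1 : Int) else 0)
        = 1 - (if x + 1 < cols ∧ pvCell shape y (x + 1) then (1 : Int) else 0) := by
      split_ifs with h1 h2 <;> simp_all <;> omega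
    have f3 : (if (x : Int) + 0 < 0 ∨ (x : Int) + 0 ≥ (cols : Int) ∨ (y : Int) + -1 < 0 ∨ (y : Int) + -1 ≥ (rows : Int) ∨
        ¬ pvCell shape (y - 1) x then (1 : Int) else 0)
        = 1 - (if 1 ≤ y ∧ pvCell shape (y - 1) x then (1 : Int) else 0) := by
      split_ifs with h1 h2 <;> simp_all <;> omega
    have f4 : (if (x : Int) + 0 < 0 ∨ (x : Int) + 0 ≥ (cols : Int) ∨ (y : Int) + 1 < 0 ∨ (y : Int) + 1 ≥ (rows : Int) ∨
        ¬ pvCell shape (y + 1) x then (1 : Int) else 0)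
        = 1 - (if y + 1 < rows ∧ pvCell shape (y + 1) x then (1 : Int) else 0) := by
      split_ifs with h1 h2 <;> simp_all <;> omega
    rw [f1, f2, f3, f4]; ring
  · simp [hb]

lemma shift_left (c : Nat → Bool) (n : Nat) :
    ∑ x ∈ Finset.range n, (if c x ∧ 1 ≤ x ∧ c (x - 1) then (1 : Int) else 0)
      = ∑ x ∈ Finset.range (n - 1), (if c x ∧ c (x + 1) then (1 : Int) else 0) := by
  cases n with
  | zero => simp
  | succ m =>
    rw [Finset.sum_range_succ']
    have h : ∀ x : Nat, (if c (x + 1) ∧ 1 ≤ x + 1 ∧ c x then (1 : Int) else 0)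
        = (if c x ∧ c (x + 1) then (1 : Int) else 0) := by
      intro x
      refine if_congr ?_ rfl rfl
      constructor
      · rintro ⟨a, _, b⟩; exact ⟨b, a⟩
      · rintro ⟨a, b⟩; exact ⟨b, Nat.le_add_left 1 x, a⟩
    have h0 : (if c 0 ∧ 1 ≤ 0 ∧ c (0 - 1) then (1 : Int) else 0) = 0 := by simp
    rw [h0, add_zero, Nat.succ_sub_one]
    exact Finset.sum_congr rfl (fun x _ => h x)

lemma shift_right (c : Nat → Bool) (n : Nat) :
    ∑ x ∈ Finset.range n, (if c x ∧ x + 1 < n ∧ c (x + 1) then (1 : Int) else 0)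
      = ∑ x ∈ Finset.range (n - 1), (if c x ∧ c (x + 1) then (1 : Int) else 0) := by
  cases n with
  | zero => simp
  | succ m =>
    rw [Finset.sum_range_succ]
    have h0 : (if c m ∧ m + 1 < m + 1 ∧ c (m + 1) then (1 : Int) else 0) = 0 := by simp
    rw [h0, add_zero, Nat.succ_sub_one]
    refine Finset.sum_congr rfl ?_
    intro x hx
    have hxm : x < m := Finset.mem_range.mp hx
    refine if_congr ?_ rfl rfl
    constructor
    · rintro ⟨a, _, b⟩; exact ⟨a, b⟩
    · rintro ⟨a, b⟩; exact ⟨a, by omega, b⟩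

lemma SharedCell_split (shape : List (List Bool)) (rows cols y x : Nat) :
    SharedCell shape rows cols y x
      = (if pvCell shape y x ∧ x + 1 < cols ∧ pvCell shape y (x + 1) then (1 : Int) else 0)
        + (if pvCell shape y x ∧ y + 1 < rows ∧ pvCell shape (y + 1) x then (1 : Int) else 0) := by
  unfold SharedCell
  by_cases hb : pvCell shape y x <;> simp [hb]

-- ===== VERDICT (by name: the statement is the Claim_ definition above) =====
theorem calculate_perimeter_py_spec : Claim_equal_calculate_perimeter_py := by
  intro shape _ _
  unfold Spec_calculate_perimeter_py
  rw [A_eq_sum shape, B_eq_sum shape]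
  have hA : (∑ y ∈ Finset.range shape.length, ∑ x ∈ Finset.range (shape.headD []).length,
        ACell shape shape.length (shape.headD []).length y x)
      = ∑ y ∈ Finset.range shape.length, ∑ x ∈ Finset.range (shape.headD []).length,
          (4 * Fill shape y x
            - (if pvCell shape y x ∧ 1 ≤ x ∧ pvCell shape y (x - 1) then (1 : Int) else 0)
            - (if pvCell shape y x ∧ x + 1 < (shape.headD []).length ∧ pvCell shape y (x + 1) then (1 : Int) else 0)
            - (if pvCell shape y x ∧ 1 ≤ y ∧ pvCell shape (y - 1) x then (1 : Int) else 0)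
            - (if pvCell shape y x ∧ y + 1 < shape.length ∧ pvCell shape (y + 1) x then (1 : Int) else 0)) :=
    Finset.sum_congr rfl (fun y hy => Finset.sum_congr rfl (fun x hx =>
      ACell_eq shape shape.length (shape.headD []).length y x
        (Finset.mem_range.mp hy) (Finset.mem_range.mp hx)))
  rw [hA]
  simp only [Finset.sum_sub_distrib, ← Finset.mul_sum]
  have hLR : (∑ y ∈ Finset.range shape.length, ∑ x ∈ Finset.range (shape.headD []).length,
        (if pvCell shape y x ∧ 1 ≤ x ∧ pvCell shape y (x - 1) then (1 : Int) else 0))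
      = ∑ y ∈ Finset.range shape.length, ∑ x ∈ Finset.range (shape.headD []).length,
        (if pvCell shape y x ∧ x + 1 < (shape.headD []).length ∧ pvCell shape y (x + 1) then (1 : Int) else 0) :=
    Finset.sum_congr rfl (fun y _ =>
      (shift_left (pvCell shape y) _).trans (shift_right (pvCell shape y) _).symm)
  have hUD : (∑ y ∈ Finset.range shape.length, ∑ x ∈ Finset.range (shape.headD []).length,
        (if pvCell shape y x ∧ 1 ≤ y ∧ pvCell shape (y - 1) x then (1 : Int) else 0))
      = ∑ y ∈ Finset.range shape.length, ∑ x ∈ Finset.range (shape.headD []).length,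
        (if pvCell shape y x ∧ y + 1 < shape.length ∧ pvCell shape (y + 1) x then (1 : Int) else 0) := by
    rw [Finset.sum_comm]
    rw [Finset.sum_comm (s := Finset.range shape.length)]
    exact Finset.sum_congr rfl (fun x _ =>
      (shift_left (fun y => pvCell shape y x) _).trans
        (shift_right (fun y => pvCell shape y x) _).symm)
  have hSh : (∑ y ∈ Finset.range shape.length, ∑ x ∈ Finset.range (shape.headD []).length,
        SharedCell shape shape.length (shape.headD []).length y x)
      = (∑ y ∈ Finset.range shape.length, ∑ x ∈ Finset.range (shape.headD []).length,
          (if pvCell shape y x ∧ x + 1 < (shape.headD []).length ∧ pvCell shape y (x + 1) then (1 : Int) else 0))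
        + (∑ y ∈ Finset.range shape.length, ∑ x ∈ Finset.range (shape.headD []).length,
          (if pvCell shape y x ∧ y + 1 < shape.length ∧ pvCell shape (y + 1) x then (1 : Int) else 0)) := by
    rw [← Finset.sum_add_distrib]
    exact Finset.sum_congr rfl (fun y _ => by
      rw [← Finset.sum_add_distrib]
      exact Finset.sum_congr rfl (fun x _ => SharedCell_split shape _ _ y x))
  rw [hSh, hLR, hUD]
  ring
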